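-- pv_equiv track=rewrite | github.com/fredericstrand/FPL_ASSISTANT | backend/fetch_data.py | get_opponents
-- ===== SOURCE A (Python) =====
-- from collections import defaultdict
--
-- def get_opponents(fixtures):
--     team_opponents = defaultdict(list)
--     for fixture in fixtures:
--         home_team = fixture['team_h']
--         away_team = fixture['team_a']
--         team_opponents[home_team].append(away_team)
--         team_opponents[away_team].append(home_team)
--
--     # Restrict to the next 3 opponents
--     for team in team_opponents:
--         team_opponents[team] = team_opponents[team][:3]
--     return team_opponents
-- ===== SOURCE B (Python) =====
-- from collections import defaultdict
--
-- def get_opponents(fixtures):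
--     # Per-team scan: list teams in first-appearance order, then collect each
--     # team's opponents by scanning the fixture pairs, keeping the first 3.
--     pairs = [(f['team_h'], f['team_a']) for f in fixtures]
--     teams = []
--     for h, a in pairs:
--         if h not in teams:
--             teams.append(h)
--         if a not in teams:
--             teams.append(a)
--     result = defaultdict(list)
--     for t in teams:
--         opps = []
--         for h, a in pairs:
--             if h == t:
--                 opps.append(a)
--             if a == t:
--                 opps.append(h)
--         result[t] = opps[:3]
--     return result
-- ===== Notes on version B (the rewrite author's own statement) =====
-- stated objective: alternative
-- what changed: A builds per-team opponent lists by mutating a dict while iterating fixtures and then truncates each entry in a second pass over the dict; B first extracts the (home, away) pairs and the first-appearance team order, then computes each team's opponent list by an independent scan of the pairs, truncated to 3.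
import Mathlib
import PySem

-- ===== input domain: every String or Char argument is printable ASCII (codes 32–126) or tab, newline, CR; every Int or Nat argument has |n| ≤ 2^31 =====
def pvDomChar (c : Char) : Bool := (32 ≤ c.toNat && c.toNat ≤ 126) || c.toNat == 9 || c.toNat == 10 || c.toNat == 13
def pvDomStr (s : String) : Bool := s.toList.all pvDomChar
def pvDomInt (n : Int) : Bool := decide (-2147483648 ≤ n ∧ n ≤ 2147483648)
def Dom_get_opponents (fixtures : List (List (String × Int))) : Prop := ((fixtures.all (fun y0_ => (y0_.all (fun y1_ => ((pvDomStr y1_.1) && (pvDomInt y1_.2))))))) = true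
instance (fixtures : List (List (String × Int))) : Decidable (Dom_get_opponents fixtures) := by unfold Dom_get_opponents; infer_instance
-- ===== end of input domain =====

-- B replaces A's dict-mutating build-then-truncate with an independent per-team scan of the (home, away) pairs in first-appearance team order (objective: alternative).

-- fixture[k] (Python dict lookup); Pre_ guarantees the key is present, so the 0 default is never used
def pvLookup (fixture : List (String × Int)) (k : String) : Int :=
  (PySem.Dict.ofList fixture).getD k 0

-- ===== PORT A =====
-- loop body: append away to d[home], home to d[away] (defaultdict(list))
def pvStepA (d : PySem.Dict Int (List Int)) (fx : List (String × Int)) : PySem.Dict Int (List Int) :=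
  let h := pvLookup fx "team_h"
  let a := pvLookup fx "team_a"
  let d1 := d.insert h (d.getD h [] ++ [a])
  d1.insert a (d1.getD a [] ++ [h])

def get_opponents (fixtures : List (List (String × Int))) : List (Int × List Int) :=
  let d := fixtures.foldl pvStepA PySem.Dict.empty
  -- second pass: for team in team_opponents: team_opponents[team] = team_opponents[team][:3]
  (d.keys.foldl (fun e t => e.insert t ((e.getD t []).take 3)) d).items

-- ===== PORT B =====
-- teams loop body: append h then a, each only if not already present
def pvTeamStep (ts : List Int) (p : Int × Int) : List Int :=
  let t1 := if p.1 ∈ ts then ts else ts ++ [p.1]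
  if p.2 ∈ t1 then t1 else t1 ++ [p.2]

-- inner opps loop body: if h == t append a; if a == t append h
def pvOppStep (t : Int) (o : List Int) (p : Int × Int) : List Int :=
  let o1 := if p.1 = t then o ++ [p.2] else o
  if p.2 = t then o1 ++ [p.1] else o1

def pvTeams (pairs : List (Int × Int)) : List Int :=
  pairs.foldl pvTeamStep []

def pvOpps (pairs : List (Int × Int)) (t : Int) : List Int :=
  pairs.foldl (pvOppStep t) []

def get_opponents_alt (fixtures : List (List (String × Int))) : List (Int × List Int) :=
  let pairs := fixtures.map (fun f => (pvLookup f "team_h", pvLookup f "team_a"))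
  let teams := pvTeams pairs
  -- result[t] = opps[:3] for t in teams, in order (teams has no duplicates)
  teams.map (fun t => (t, (pvOpps pairs t).take 3))

-- ===== PRECONDITION & SPEC =====
-- Pre_ excludes fixtures missing the 'team_h' or 'team_a' key, on which A raises KeyError.
def Pre_get_opponents (fixtures : List (List (String × Int))) : Prop :=
  (fixtures.all (fun f => (PySem.Dict.ofList f).contains "team_h" && (PySem.Dict.ofList f).contains "team_a")) = true
instance (fixtures : List (List (String × Int))) : Decidable (Pre_get_opponents fixtures) := by unfold Pre_get_opponents; infer_instance

def pvWitness_get_opponents : (List (List (String × Int))) := [[("team_h", 1), ("team_a", 2)], [("team_h", 2), ("team_a", 3)]]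

def Spec_get_opponents (fixtures : List (List (String × Int))) (out : List (Int × List Int)) : Prop := out = get_opponents_alt fixtures
instance (fixtures : List (List (String × Int))) (out : List (Int × List Int)) : Decidable (Spec_get_opponents fixtures out) := by unfold Spec_get_opponents; infer_instance

-- ===== CLAIM (what is proved, stated in full; the proofs are below) =====
def Claim_equal_get_opponents : Prop := ∀ (fixtures : List (List (String × Int))), Dom_get_opponents fixtures → Pre_get_opponents fixtures → Spec_get_opponents fixtures (get_opponents fixtures)

-- ===== LEMMAS AND PROOFS =====

-- A's loop body, expressed on the (home, away) pair (definitionally pvStepA)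
def pvStepP (d : PySem.Dict Int (List Int)) (p : Int × Int) : PySem.Dict Int (List Int) :=
  let d1 := d.insert p.1 (d.getD p.1 [] ++ [p.2])
  d1.insert p.2 (d1.getD p.2 [] ++ [p.1])

theorem pv_append_nodup (l : List Int) (x : Int) (hl : l.Nodup) (hx : x ∉ l) :
    (l ++ [x]).Nodup := by
  rw [List.nodup_append]
  refine ⟨hl, List.nodup_singleton x, ?_⟩
  intro a ha b hb
  rw [List.mem_singleton] at hb
  subst hb
  exact fun he => hx (he ▸ ha)

theorem pvTeamStep_nodup (ts : List Int) (p : Int × Int) (h : ts.Nodup) :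
    (pvTeamStep ts p).Nodup := by
  unfold pvTeamStep
  dsimp only
  split_ifs with h1 h2 h2
  · exact h
  · exact pv_append_nodup ts p.2 h h2
  · exact pv_append_nodup ts p.1 h h1
  · exact pv_append_nodup _ p.2 (pv_append_nodup ts p.1 h h1) h2

theorem pvTeamStep_superset (ts : List Int) (p : Int × Int) {t : Int} (h : t ∈ ts) :
    t ∈ pvTeamStep ts p := by
  unfold pvTeamStep
  dsimp only
  split_ifs <;> simp_all

theorem pvTeamStep_mem_fst (ts : List Int) (p : Int × Int) : p.1 ∈ pvTeamStep ts p := by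
  unfold pvTeamStep
  dsimp only
  split_ifs <;> simp_all

theorem pvTeamStep_mem_snd (ts : List Int) (p : Int × Int) : p.2 ∈ pvTeamStep ts p := by
  unfold pvTeamStep
  dsimp only
  split_ifs <;> simp_all

-- a dict whose items list is ts.map (t, g t): its keys and lookups
theorem pv_keys_char (ts : List Int) (g : Int → List Int) (d : PySem.Dict Int (List Int))
    (hd : d.items = ts.map fun t => (t, g t)) : d.keys = ts := by
  simp [PySem.Dict.keys, hd, List.map_map, Function.comp_def]

theorem pv_getD_char (ts : List Int) (g : Int → List Int) (hnd : ts.Nodup)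
    (hg : ∀ t, t ∉ ts → g t = [])
    (d : PySem.Dict Int (List Int)) (hd : d.items = ts.map fun t => (t, g t)) (k : Int) :
    d.getD k [] = g k := by
  have hkeys : d.keys = ts := pv_keys_char ts g d hd
  by_cases hk : k ∈ ts
  · refine PySem.Dict.getD_of_mem_items d ?_ (by rw [hkeys]; exact hnd) []
    rw [hd]
    exact List.mem_map_of_mem hk
  · rw [PySem.Dict.getD_of_not_contains d _ ?_, hg k hk]
    rw [PySem.Dict.contains_eq_decide_mem_keys, hkeys]
    simp [hk]

theorem pv_insert_char (ts : List Int) (g : Int → List Int)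
    (d : PySem.Dict Int (List Int)) (hd : d.items = ts.map fun t => (t, g t))
    (k : Int) (v : List Int) :
    (d.insert k v).items
      = (if k ∈ ts then ts else ts ++ [k]).map
          (fun t => (t, if t = k then v else g t)) := by
  have hkeys : d.keys = ts := pv_keys_char ts g d hd
  have hc : d.contains k = decide (k ∈ ts) := by
    rw [PySem.Dict.contains_eq_decide_mem_keys, hkeys]
  by_cases hk : k ∈ ts
  · rw [if_pos hk, PySem.Dict.items_insert_of_contains d _ (by simp [hc, hk]), hd,
      List.map_map]
    apply List.map_congr_left
    intro t _
    by_cases ht : t = k <;> simp [ht]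
  · rw [if_neg hk, PySem.Dict.items_insert_of_not_contains d _ (by simp [hc, hk]), hd]
    rw [List.map_append]
    congr 1
    · apply List.map_congr_left
      intro t hts
      have : t ≠ k := fun he => hk (he ▸ hts)
      simp [this]
    · simp

-- one pvStepP on a characterised dict = pvTeamStep / pvOppStep on the characterisation
theorem pv_stepP_char (ts : List Int) (g : Int → List Int) (hnd : ts.Nodup)
    (hg : ∀ t, t ∉ ts → g t = [])
    (d : PySem.Dict Int (List Int)) (hd : d.items = ts.map fun t => (t, g t)) (p : Int × Int) :
    (pvStepP d p).items = (pvTeamStep ts p).map (fun t => (t, pvOppStep t (g t) p)) := by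
  obtain ⟨h, a⟩ := p
  unfold pvStepP
  dsimp only
  rw [pv_getD_char ts g hnd hg d hd h]
  set ts1 := if h ∈ ts then ts else ts ++ [h] with hts1
  set g1 := fun t => if t = h then g h ++ [a] else g t with hg1
  have hd1 : (d.insert h (g h ++ [a])).items = ts1.map fun t => (t, g1 t) :=
    pv_insert_char ts g d hd h (g h ++ [a])
  have hnd1 : ts1.Nodup := by
    rw [hts1]
    split_ifs with hm
    · exact hnd
    · exact pv_append_nodup ts h hnd hm
  have hgz1 : ∀ t, t ∉ ts1 → g1 t = [] := by
    intro t ht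
    have hth : t ≠ h := by
      intro he
      subst he
      exact ht (by rw [hts1]; split_ifs with hm; exacts [hm, by simp])
    have hts : t ∉ ts := by
      intro hm
      exact ht (by rw [hts1]; split_ifs <;> simp [hm])
    simp [hg1, hth, hg t hts]
  rw [pv_getD_char ts1 g1 hnd1 hgz1 _ hd1 a]
  rw [pv_insert_char ts1 g1 _ hd1 a (g1 a ++ [h])]
  have hts2 : (if a ∈ ts1 then ts1 else ts1 ++ [a]) = pvTeamStep ts (h, a) := by
    rw [pvTeamStep, hts1]
  rw [hts2]
  apply List.map_congr_left
  intro t _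
  unfold pvOppStep
  dsimp only [hg1]
  rcases eq_or_ne t h with rfl | hth <;> rcases eq_or_ne t a with rfl | hta
  · simp [hg1]
  · simp [hg1, hta, Ne.symm hta]
  · simp [hg1, hth, Ne.symm hth]
  · simp [hg1, hth, hta, Ne.symm hth, Ne.symm hta]

-- main invariant: the dict A builds is B's teams list paired with B's opponent lists
theorem pv_main (ps : List (Int × Int)) :
    (pvTeams ps).Nodup ∧ (∀ t, t ∉ pvTeams ps → pvOpps ps t = []) ∧
      (ps.foldl pvStepP PySem.Dict.empty).items
        = (pvTeams ps).map (fun t => (t, pvOpps ps t)) := by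
  induction ps using List.reverseRecOn with
  | nil => exact ⟨List.nodup_nil, fun t _ => rfl, rfl⟩
  | append_singleton qs q ih =>
    obtain ⟨ihnd, ihz, ihit⟩ := ih
    have hteams : pvTeams (qs ++ [q]) = pvTeamStep (pvTeams qs) q := by
      simp [pvTeams, List.foldl_append]
    have hopps : ∀ t, pvOpps (qs ++ [q]) t = pvOppStep t (pvOpps qs t) q := by
      intro t
      simp [pvOpps, List.foldl_append]
    refine ⟨by rw [hteams]; exact pvTeamStep_nodup _ _ ihnd, ?_, ?_⟩
    · intro t ht
      rw [hteams] at ht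
      have h1 : t ∉ pvTeams qs := fun hm => ht (pvTeamStep_superset _ _ hm)
      have h2 : t ≠ q.1 := fun he => ht (he ▸ pvTeamStep_mem_fst _ _)
      have h3 : t ≠ q.2 := fun he => ht (he ▸ pvTeamStep_mem_snd _ _)
      rw [hopps t, ihz t h1]
      unfold pvOppStep
      simp [Ne.symm h2, Ne.symm h3]
    · rw [List.foldl_append, List.foldl_cons, List.foldl_nil, hteams]
      rw [pv_stepP_char (pvTeams qs) (pvOpps qs) ihnd ihz _ ihit q]
      apply List.map_congr_left
      intro t _
      rw [hopps t]

-- A's second pass over a key list truncates exactly those keys' values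
theorem pv_pass (ks : List Int) (d : PySem.Dict Int (List Int))
    (hnd : d.keys.Nodup) (hks : ks.Nodup) (hmem : ∀ t ∈ ks, d.contains t = true) :
    ks.foldl (fun e t => e.insert t ((e.getD t []).take 3)) d
      = PySem.Dict.mk (d.items.map (fun p => if p.1 ∈ ks then (p.1, p.2.take 3) else p)) := by
  induction ks generalizing d with
  | nil =>
    simp only [List.foldl_nil, List.not_mem_nil, if_false]
    exact (PySem.Dict.ext (by simp)).symm
  | cons t ks ih =>
    have hct : d.contains t = true := hmem t (by simp)
    have hstep : d.insert t ((d.getD t []).take 3)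
        = PySem.Dict.mk (d.items.map (fun p => if p.1 = t then (p.1, p.2.take 3) else p)) := by
      apply PySem.Dict.ext
      rw [PySem.Dict.items_insert_of_contains _ _ hct]
      show _ = d.items.map _
      apply List.map_congr_left
      intro p hp
      by_cases hpt : p.1 = t
      · have := PySem.Dict.getD_of_mem_items d (k := p.1) (v := p.2) (by simpa using hp) hnd []
        simp [hpt, ← this]
      · simp [hpt]
    have hkeys : (d.insert t ((d.getD t []).take 3)).keys = d.keys := by
      rw [hstep]
      simp only [PySem.Dict.keys, List.map_map]
      apply List.map_congr_left
      intro p _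
      by_cases hpt : p.1 = t <;> simp [hpt]
    simp only [List.foldl_cons]
    rw [ih (d.insert t ((d.getD t []).take 3)) (by rw [hkeys]; exact hnd)
      (List.Nodup.of_cons hks)
      (by intro u hu
          rw [PySem.Dict.contains_iff_mem_keys, hkeys,
            ← PySem.Dict.contains_iff_mem_keys]
          exact hmem u (List.mem_cons_of_mem _ hu))]
    apply PySem.Dict.ext
    rw [hstep]
    show (d.items.map _).map _ = d.items.map _
    rw [List.map_map]
    apply List.map_congr_left
    intro p _
    have htks : t ∉ ks := (List.nodup_cons.mp hks).1
    by_cases hpt : p.1 = t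
    · simp [hpt, htks]
    · by_cases hpk : p.1 ∈ ks <;> simp [hpt, hpk]

theorem get_opponents_spec : Claim_equal_get_opponents := by
  intro fixtures _ _
  unfold Spec_get_opponents get_opponents get_opponents_alt
  dsimp only
  set pairs := fixtures.map (fun f => (pvLookup f "team_h", pvLookup f "team_a")) with hpairs
  have hA : fixtures.foldl pvStepA PySem.Dict.empty = pairs.foldl pvStepP PySem.Dict.empty := by
    rw [hpairs, List.foldl_map]
    rfl
  obtain ⟨hnd, hz, hit⟩ := pv_main pairs
  set dA := pairs.foldl pvStepP PySem.Dict.empty with hdA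
  have hkeys : dA.keys = pvTeams pairs := pv_keys_char _ _ _ hit
  have hknd : dA.keys.Nodup := by rw [hkeys]; exact hnd
  rw [hA]
  rw [pv_pass dA.keys dA hknd hknd
    (by intro t ht; exact (PySem.Dict.contains_iff_mem_keys _ _).mpr ht)]
  show dA.items.map _ = _
  rw [hit, List.map_map]
  apply List.map_congr_left
  intro t ht
  have : t ∈ dA.keys := by rw [hkeys]; exact ht
  simp [this]
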